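-- pv_equiv track=rewrite | github.com/fanatic/adventofcode | 2018/day_7.py | find_next_step
-- ===== SOURCE A (Python) =====
-- def find_next_step(all_steps, graph, ignore=set()):
--     possible = set()
--     for s in sorted(all_steps):
--         try:
--             if len(graph[s] & all_steps) == 0:
--                 possible.add(s)
--         except KeyError:
--             possible.add(s)
--     next_steps = (possible - ignore)
--     if len(next_steps) == 0:
--         return None
--
--     return sorted(next_steps)[0]
-- ===== SOURCE B (Python) =====
-- def find_next_step(all_steps, graph, ignore=set()):
--     for s in sorted(all_steps):
--         if s in ignore:
--             continue
--         try:
--             if len(graph[s] & all_steps) == 0: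
--                 return s
--         except KeyError:
--             return s
--     return None
-- ===== Notes on version B (the rewrite author's own statement) =====
-- stated objective: simpler
-- what changed: Replaces the collect-all-candidates-into-a-set, subtract ignore, re-sort-and-take-min pipeline by a single ordered scan over sorted(all_steps) that returns the first non-ignored step whose dependencies are satisfied.
import Mathlib
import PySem

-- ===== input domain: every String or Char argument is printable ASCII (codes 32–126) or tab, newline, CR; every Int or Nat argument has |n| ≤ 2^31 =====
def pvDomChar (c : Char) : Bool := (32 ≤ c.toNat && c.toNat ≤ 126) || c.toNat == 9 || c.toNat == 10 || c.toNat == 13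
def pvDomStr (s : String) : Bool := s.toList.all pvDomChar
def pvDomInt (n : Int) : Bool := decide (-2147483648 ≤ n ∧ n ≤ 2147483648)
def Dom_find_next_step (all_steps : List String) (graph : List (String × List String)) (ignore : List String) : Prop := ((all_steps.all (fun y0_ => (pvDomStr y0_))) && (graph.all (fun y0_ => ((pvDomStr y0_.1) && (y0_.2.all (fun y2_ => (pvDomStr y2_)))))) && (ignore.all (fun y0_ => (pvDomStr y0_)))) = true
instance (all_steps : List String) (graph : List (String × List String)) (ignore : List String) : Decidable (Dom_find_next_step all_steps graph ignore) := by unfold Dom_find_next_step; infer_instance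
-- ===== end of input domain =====

-- B replaces A's collect-into-a-set / subtract-ignore / re-sort-and-take-min pipeline
-- by a single ordered scan over sorted(all_steps) returning the first admissible step (objective: simpler).


-- ===== PORT A =====
def find_next_step (all_steps : List String) (graph : List (String × List String)) (ignore : List String) : Option String :=
  let possible : PySem.Set String :=
    (PySem.List.sorted all_steps (fun x => x) false).foldl
      (fun poss s =>
        match PySem.Dict.get? ⟨graph⟩ s with
        | some deps =>
            if PySem.Set.len (PySem.Set.inter deps all_steps) == 0 then PySem.Set.add poss s
            else poss
        | none => PySem.Set.add poss s)  -- except KeyError: possible.add(s)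
      PySem.Set.empty
  let next_steps : PySem.Set String := PySem.Set.diff possible ignore
  if PySem.Set.len next_steps == 0 then none
  else (PySem.List.sorted next_steps (fun x => x) false).head?

-- ===== PORT B =====
-- B-side helper: the loop body of Source B's `for s in sorted(all_steps)` scan
def pvScan (graph : List (String × List String)) (all_steps ignore : List String) : List String → Option String
  | [] => none
  | s :: rest =>
    if ignore.contains s then pvScan graph all_steps ignore rest
    else
      match PySem.Dict.get? ⟨graph⟩ s with
      | some deps =>
          if PySem.Set.len (PySem.Set.inter deps all_steps) == 0 then some s
          else pvScan graph all_steps ignore rest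
      | none => some s

def find_next_step_alt (all_steps : List String) (graph : List (String × List String)) (ignore : List String) : Option String :=
  pvScan graph all_steps ignore (PySem.List.sorted all_steps (fun x => x) false)

-- ===== PRECONDITION & SPEC =====
def Spec_find_next_step (all_steps : List String) (graph : List (String × List String)) (ignore : List String) (out : Option String) : Prop := out = find_next_step_alt all_steps graph ignore
instance (all_steps : List String) (graph : List (String × List String)) (ignore : List String) (out : Option String) : Decidable (Spec_find_next_step all_steps graph ignore out) := by unfold Spec_find_next_step; infer_instance

-- ===== CLAIM (what is proved, stated in full; the proofs are below) =====
def Claim_equal_find_next_step : Prop := ∀ (all_steps : List String) (graph : List (String × List String)) (ignore : List String), Dom_find_next_step all_steps graph ignore → Spec_find_next_step all_steps graph ignore (find_next_step all_steps graph ignore)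

-- ===== LEMMAS AND PROOFS =====

-- "step s has no unsatisfied dependency" (the shared condition of both programs)
def pvSat (all_steps : List String) (graph : List (String × List String)) (s : String) : Bool :=
  match PySem.Dict.get? ⟨graph⟩ s with
  | some deps => PySem.Set.len (PySem.Set.inter deps all_steps) == 0
  | none => true

-- B's scan is find? of the combined predicate
theorem pvScan_eq_find? (graph : List (String × List String)) (all_steps ignore : List String)
    (l : List String) :
    pvScan graph all_steps ignore l
      = l.find? (fun s => !ignore.contains s && pvSat all_steps graph s) := by
  induction l with
  | nil => rfl
  | cons s rest ih =>
    simp only [pvScan]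
    by_cases hig : ignore.contains s = true
    · have hp : (!ignore.contains s && pvSat all_steps graph s) = false := by rw [hig]; rfl
      rw [if_pos hig,
        List.find?_cons_of_neg (p := fun s => !ignore.contains s && pvSat all_steps graph s)
          (by simp only [hp]; simp), ih]
    · rw [if_neg hig]
      have hig' : ignore.contains s = false := by simpa using hig
      cases h : PySem.Dict.get? (⟨graph⟩ : PySem.Dict String (List String)) s with
      | none =>
        have hp : (!ignore.contains s && pvSat all_steps graph s) = true := by
          simp only [pvSat, h, hig']; rfl
        rw [List.find?_cons_of_pos (p := fun s => !ignore.contains s && pvSat all_steps graph s) hp]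
      | some deps =>
        by_cases hlen : (PySem.Set.len (PySem.Set.inter deps all_steps) == 0) = true
        · have hp : (!ignore.contains s && pvSat all_steps graph s) = true := by
            simp only [pvSat, h, hig', hlen]; rfl
          rw [List.find?_cons_of_pos (p := fun s => !ignore.contains s && pvSat all_steps graph s) hp]
          show (if (PySem.Set.len (PySem.Set.inter deps all_steps) == 0) = true
              then some s else pvScan graph all_steps ignore rest) = some s
          rw [if_pos hlen]
        · have hlen' : (PySem.Set.len (PySem.Set.inter deps all_steps) == 0) = false := by
            simpa using hlen
          have hp : (!ignore.contains s && pvSat all_steps graph s) = false := by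
            simp only [pvSat, h, hig', hlen']; rfl
          rw [List.find?_cons_of_neg (p := fun s => !ignore.contains s && pvSat all_steps graph s)
            (by simp only [hp]; simp)]
          show (if (PySem.Set.len (PySem.Set.inter deps all_steps) == 0) = true
              then some s else pvScan graph all_steps ignore rest)
            = List.find? (fun s => !ignore.contains s && pvSat all_steps graph s) rest
          rw [if_neg hlen, ih]

-- A's accumulation loop is a conditional-add fold: it equals the plain Set fold over the filtered list
theorem pvFoldl_cond_add (all_steps : List String) (graph : List (String × List String))
    (l : List String) (acc : PySem.Set String) :
    l.foldl
      (fun poss s =>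
        match PySem.Dict.get? (⟨graph⟩ : PySem.Dict String (List String)) s with
        | some deps =>
            if PySem.Set.len (PySem.Set.inter deps all_steps) == 0 then PySem.Set.add poss s
            else poss
        | none => PySem.Set.add poss s) acc
      = (l.filter (pvSat all_steps graph)).foldl PySem.Set.add acc := by
  induction l generalizing acc with
  | nil => rfl
  | cons s rest ih =>
    rw [List.foldl_cons, List.filter_cons]
    cases h : PySem.Dict.get? (⟨graph⟩ : PySem.Dict String (List String)) s with
    | none =>
      have hs : pvSat all_steps graph s = true := by simp only [pvSat, h]
      simp only [hs, if_true, List.foldl_cons]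
      exact ih (PySem.Set.add acc s)
    | some deps =>
      by_cases hlen : (PySem.Set.len (PySem.Set.inter deps all_steps) == 0) = true
      · have hs : pvSat all_steps graph s = true := by simp only [pvSat, h, hlen]
        simp only [hs, if_pos hlen, if_true, List.foldl_cons]
        exact ih (PySem.Set.add acc s)
      · have hs : pvSat all_steps graph s = false := by
          simp only [pvSat, h]; simpa using hlen
        simp only [hs, if_neg hlen, Bool.false_eq_true, if_false]
        exact ih acc

-- the Set fold appends a subsequence of its input
theorem pvFoldl_add_sublist {a : Type} [BEq a] [LawfulBEq a] (l : List a) :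
    ∀ acc : PySem.Set a, ∃ t : List a, l.foldl PySem.Set.add acc = acc ++ t ∧ List.Sublist t l := by
  induction l with
  | nil => exact fun acc => ⟨[], by simp⟩
  | cons x xs ih =>
    intro acc
    simp only [List.foldl, PySem.Set.add]
    split_ifs with hx
    · obtain ⟨t, ht, hs⟩ := ih acc
      exact ⟨t, ht, hs.cons x⟩
    · obtain ⟨t, ht, hs⟩ := ih (acc ++ [x])
      exact ⟨x :: t, by rw [ht]; simp, hs.cons₂ x⟩

-- dedup does not change the first element satisfying a predicate
theorem pvFind?_foldl_add {a : Type} [BEq a] [LawfulBEq a] (p : a → Bool) (l : List a) :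
    ∀ acc : List a, (l.foldl PySem.Set.add acc).find? p = (acc ++ l).find? p := by
  induction l with
  | nil => simp
  | cons x xs ih =>
    intro acc
    simp only [List.foldl, PySem.Set.add]
    split_ifs with hx
    · rw [ih acc]
      by_cases hp : p x = true
      · have hmem : x ∈ acc := by simpa using hx
        obtain ⟨y, hy⟩ := Option.isSome_iff_exists.mp (List.find?_isSome.mpr ⟨x, hmem, hp⟩)
        simp [List.find?_append, hy]
      · have hp' : p x = false := by simpa using hp
        simp [List.find?_append, hp']
    · rw [ih (acc ++ [x])]
      simp [List.find?_append, List.find?_cons]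

theorem pvFind?_ofList {a : Type} [BEq a] [LawfulBEq a] (p : a → Bool) (l : List a) :
    (PySem.Set.ofList l).find? p = l.find? p := by
  simpa [PySem.Set.ofList] using pvFind?_foldl_add p l []

theorem find_next_step_eq_find? (all_steps : List String) (graph : List (String × List String))
    (ignore : List String) :
    find_next_step all_steps graph ignore
      = (PySem.List.sorted all_steps (fun x => x) false).find?
          (fun s => !ignore.contains s && pvSat all_steps graph s) := by
  unfold find_next_step
  rw [pvFoldl_cond_add]
  set L := PySem.List.sorted all_steps (fun x => x) false with hL
  set F := L.filter (pvSat all_steps graph) with hF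
  have hofl : F.foldl PySem.Set.add PySem.Set.empty = PySem.Set.ofList F := rfl
  rw [hofl]
  set M : List String := PySem.Set.diff (PySem.Set.ofList F) ignore with hM
  -- M is strictly increasing: it is a Nodup subsequence of the sorted list L
  obtain ⟨t, ht, hts⟩ := pvFoldl_add_sublist F []
  have hofF_sub : List.Sublist (PySem.Set.ofList F) F := by
    have : PySem.Set.ofList F = t := by simpa [PySem.Set.ofList] using ht
    rw [this]; exact hts
  have hM_sub_ofF : List.Sublist M (PySem.Set.ofList F) := by
    simp [hM, PySem.Set.diff]
  have hM_sub_L : List.Sublist M L :=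
    (hM_sub_ofF.trans hofF_sub).trans (List.filter_sublist (l := L))
  have hLpw : L.Pairwise (fun a b : String => a ≤ b) := by
    simpa using PySem.List.sorted_pairwise (xs := all_steps) (key := fun x : String => x)
  have hM_le : M.Pairwise (fun a b : String => a ≤ b) := hLpw.sublist hM_sub_L
  have hM_nodup : M.Nodup := (PySem.Set.nodup_ofList (xs := F)).sublist hM_sub_ofF
  have hM_lt : M.Pairwise (fun a b : String => a < b) :=
    (hM_nodup.and hM_le).imp (fun {a b} h => lt_of_le_of_ne h.2 h.1)
  have hsorted : PySem.List.sorted M (fun x => x) false = M :=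
    PySem.List.sorted_eq_of_perm_of_pairwise_lt M M (fun x => x) (List.Perm.refl M) hM_lt
  -- the guarded head of sorted M is just M.head?
  have hA : (if PySem.Set.len M == 0 then none
      else (PySem.List.sorted M (fun x => x) false).head?) = M.head? := by
    by_cases h0 : (PySem.Set.len M == 0) = true
    · have h0' : M.length = 0 := by simpa [PySem.Set.len] using h0
      rw [if_pos h0, List.eq_nil_of_length_eq_zero h0']
      rfl
    · rw [if_neg h0, hsorted]
  rw [hA]
  -- head of the filtered list is find?, and dedup commutes with find?
  have hhead : M.head? = (PySem.Set.ofList F).find? (fun s => !ignore.contains s) := by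
    simp [hM, PySem.Set.diff, List.head?_filter]
  rw [hhead, pvFind?_ofList, hF, List.find?_filter]
  have hpred : (fun a : String => decide (pvSat all_steps graph a = true ∧ (!ignore.contains a) = true))
      = fun s : String => !ignore.contains s && pvSat all_steps graph s := by
    funext s
    by_cases h1 : pvSat all_steps graph s = true <;> by_cases h2 : ignore.contains s = true <;>
      simp [h1]
  rw [hpred]

-- ===== VERDICT (by name: the statement is the Claim_ definition above) =====
theorem find_next_step_spec : Claim_equal_find_next_step := by
  intro all_steps graph ignore _
  unfold Spec_find_next_step find_next_step_alt
  rw [find_next_step_eq_find?, pvScan_eq_find?]
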